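-- pv_equiv track=rewrite | github.com/dimitori-g/phonetics-tools | phonetic_tree.py | build_children_map
-- ===== SOURCE A (Python) =====
-- from typing import Dict, List
--
-- def build_children_map(phonetics: Dict[str, str]) -> Dict[str, List[str]]:
--     """
--     Build a reverse mapping from parent -> list of children.
--     """
--     children_map = {}
--     for child, parent in phonetics.items():
--         if parent not in ("0", "1"):
--             if parent not in children_map:
--                 children_map[parent] = []
--             children_map[parent].append(child)
--
--     # Sort children for consistent output
--     for parent in children_map:
--         children_map[parent].sort()
--
--     return children_map
-- ===== SOURCE B (Python) =====
-- def build_children_map(phonetics):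
--     """Build a reverse mapping from parent -> list of children."""
--     parents = dict.fromkeys(p for p in phonetics.values() if p not in ("0", "1"))
--     return {parent: sorted(c for c, p in phonetics.items() if p == parent)
--             for parent in parents}
-- ===== Notes on version B (the rewrite author's own statement) =====
-- stated objective: simpler
-- what changed: Instead of A's incremental dict of growing buckets followed by a second loop sorting every bucket in place, B first collects the distinct non-root parents in order and builds the result in one dict comprehension, gathering and sorting each parent's children directly.
import Mathlib
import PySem

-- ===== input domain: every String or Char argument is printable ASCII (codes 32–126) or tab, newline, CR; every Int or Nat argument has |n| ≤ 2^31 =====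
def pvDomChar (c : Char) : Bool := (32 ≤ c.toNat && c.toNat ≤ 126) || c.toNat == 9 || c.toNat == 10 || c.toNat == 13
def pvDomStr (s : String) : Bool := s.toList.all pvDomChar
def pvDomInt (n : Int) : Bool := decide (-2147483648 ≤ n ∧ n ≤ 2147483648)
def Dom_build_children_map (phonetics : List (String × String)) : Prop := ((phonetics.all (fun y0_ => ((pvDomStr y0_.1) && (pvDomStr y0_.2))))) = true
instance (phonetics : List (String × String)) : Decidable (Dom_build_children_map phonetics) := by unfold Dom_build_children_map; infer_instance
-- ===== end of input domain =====

-- B replaces A's insert-then-append loop plus per-bucket sort loop by a single pass over the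
-- distinct parents, gathering and sorting each parent's children directly (objective: simpler).
-- ===== PORT A =====
def build_children_map (phonetics : List (String × String)) : List (String × List String) :=
  let cm : PySem.Dict String (List String) :=
    phonetics.foldl (fun cm cp =>
      if cp.2 == "0" || cp.2 == "1" then cm
      else
        let cm := if cm.contains cp.2 then cm else cm.insert cp.2 []
        cm.modify cp.2 [] (fun l => l ++ [cp.1]))
      PySem.Dict.empty
  -- 'for parent in children_map: children_map[parent].sort()' sorts every value in place
  (cm.items).map (fun pr => (pr.1, PySem.List.sorted pr.2 (fun x => x) false))

-- ===== PORT B =====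
def build_children_map_alt (phonetics : List (String × String)) : List (String × List String) :=
  let parents := PySem.List.dedup ((phonetics.filter (fun cp => !(cp.2 == "0" || cp.2 == "1"))).map Prod.snd)
  parents.map (fun parent =>
    (parent, PySem.List.sorted ((phonetics.filter (fun cp => cp.2 == parent)).map Prod.fst) (fun x => x) false))

-- ===== PRECONDITION & SPEC =====
def Spec_build_children_map (phonetics : List (String × String)) (out : List (String × List String)) : Prop := out = build_children_map_alt phonetics
instance (phonetics : List (String × String)) (out : List (String × List String)) : Decidable (Spec_build_children_map phonetics out) := by unfold Spec_build_children_map; infer_instance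

-- ===== CLAIM (what is proved, stated in full; the proofs are below) =====
def Claim_equal_build_children_map : Prop := ∀ (phonetics : List (String × String)), Dom_build_children_map phonetics → Spec_build_children_map phonetics (build_children_map phonetics)

-- ===== LEMMAS AND PROOFS =====

-- A's "if absent, insert []; then append" step is exactly Dict.modify with default [].
theorem insert_then_modify (cm : PySem.Dict String (List String)) (k : String)
    (f : List String → List String) :
    (if cm.contains k then cm else cm.insert k []).modify k [] f = cm.modify k [] f := by
  by_cases h : cm.contains k = true
  · simp [h]
  · have h' : cm.contains k = false := by simpa using h
    simp [PySem.Dict.modify, h', PySem.Dict.getD_insert_self, PySem.Dict.insert_insert_self,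
          PySem.Dict.getD_of_not_contains]

-- ===== VERDICT =====
theorem build_children_map_spec : Claim_equal_build_children_map := by
  intro ph _
  show _ = build_children_map_alt ph
  unfold build_children_map build_children_map_alt
  simp only []
  -- canonical grouping step
  rw [PySem.List.foldl_congr_mem ph _
      (fun cm cp => if !(cp.2 == "0" || cp.2 == "1") then
          cm.modify cp.2 [] (fun l => l ++ [cp.1]) else cm) _
      (by
        intro acc cp _
        by_cases hb : (cp.2 == "0" || cp.2 == "1") = true
        · simp [hb]
        · simp only [hb, Bool.false_eq_true, if_false, Bool.not_false]
          simpa using insert_then_modify acc cp.2 (fun l => l ++ [cp.1]))]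
  rw [PySem.List.foldl_if_eq_foldl_filter]
  set p : String × String → Bool := fun cp => !(cp.2 == "0" || cp.2 == "1") with hp
  set L : List (String × String) := ph.filter p with hL
  set D : PySem.Dict String (List String) :=
    L.foldl (fun cm cp => cm.modify cp.2 [] (fun l => l ++ [cp.1])) PySem.Dict.empty with hD
  have hnd : D.keys.Nodup := by
    rw [hD]
    exact PySem.Dict.nodup_keys_foldl_modify_key L Prod.snd []
      (fun _ cp => fun l => l ++ [cp.1]) PySem.Dict.empty (by simp [PySem.Dict.keys_empty])
  have hkeys : D.keys = PySem.List.dedup (L.map Prod.snd) := by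
    rw [hD, PySem.Dict.keys_foldl_modify_key L Prod.snd []
      (fun _ cp => fun l => l ++ [cp.1]) PySem.Dict.empty]
    rw [PySem.List.dedup_eq_ofList, PySem.Set.ofList_eq_foldl]
    simp [PySem.Set.update, PySem.Dict.keys_empty]
  have hgetD : ∀ k : String, D.getD k [] = (L.filter (fun cp => cp.2 == k)).map Prod.fst := by
    intro k
    have hswap : D = (L.map Prod.swap).foldl
        (fun d pr => d.modify pr.1 [] (fun l => l ++ [pr.2])) PySem.Dict.empty := by
      rw [hD, List.foldl_map]; rfl
    rw [hswap, PySem.Dict.getD_foldl_modify_append, List.filter_map, List.map_map]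
    simp [PySem.Dict.getD_empty, Function.comp_def]
  rw [PySem.Dict.items_eq_map_keys D hnd [], List.map_map, hkeys]
  apply List.map_congr_left
  intro k hk
  have hkL : k ∈ L.map Prod.snd := by
    rw [PySem.List.dedup_eq_ofList] at hk
    exact (PySem.Set.mem_ofList _ _).mp hk
  have hknot : (k == "0" || k == "1") = false := by
    obtain ⟨cp, hcp, rfl⟩ := List.mem_map.mp hkL
    have := List.of_mem_filter hcp
    simpa [hp] using this
  have hLfilter : L.filter (fun cp => cp.2 == k) = ph.filter (fun cp => cp.2 == k) := by
    rw [hL, List.filter_filter]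
    apply List.filter_congr
    intro cp _
    by_cases hq : (cp.2 == k) = true
    · have hck : cp.2 = k := by simpa using hq
      have hk2 : ¬k = "0" ∧ ¬k = "1" := by simpa using hknot
      simp [hp, hck, hk2.1, hk2.2]
    · simp [hq]
  simp [hgetD k, hLfilter]
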